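-- pv_equiv track=rewrite | github.com/off-path/pwnme | misc/decode_runner/both/leet_speak.py | leet_speak_decoder
-- ===== SOURCE A (Python) =====
-- leet_dict = {
--         'A': '4', 'B': '8', 'C': 'C', 'D': 'D', 'E': '3', 'F': 'F', 'G': '6', 'H': 'H', 'I': '1', 'J': 'J',
--         'K': '|<', 'L': '1', 'M': 'M', 'N': 'N', 'O': '0', 'P': 'P', 'Q': 'Q', 'R': 'r', 'S': '5', 'T': '7',
--         'U': 'U', 'V': 'V', 'W': 'W', 'X': 'X', 'Y': 'Y', 'Z': 'Z'
--     }
--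
-- def leet_speak_decoder(text):
--
--
--     # Create an inverse dictionary for decoding
--     inverse_leet_dict = {v: k for k, v in leet_dict.items()}
--
--     # Decode the text from leet speak
--     decoded_text = ''
--     i = 0
--     while i < len(text):
--         match_found = False
--         # Check for multi-character mappings first
--         for length in range(4, 0, -1):  # Longest to shortest
--             if i + length <= len(text) and text[i:i + length] in inverse_leet_dict:
--                 decoded_text += inverse_leet_dict[text[i:i + length]]
--                 i += length
--                 match_found = True
--                 break
--         if not match_found:
--             decoded_text += text[i]
--             i += 1
--
--     return decoded_text
-- ===== SOURCE B (Python) =====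
-- leet_dict = {
--         'A': '4', 'B': '8', 'C': 'C', 'D': 'D', 'E': '3', 'F': 'F', 'G': '6', 'H': 'H', 'I': '1', 'J': 'J',
--         'K': '|<', 'L': '1', 'M': 'M', 'N': 'N', 'O': '0', 'P': 'P', 'Q': 'Q', 'R': 'r', 'S': '5', 'T': '7',
--         'U': 'U', 'V': 'V', 'W': 'W', 'X': 'X', 'Y': 'Y', 'Z': 'Z'
--     }
--
-- # The leet table is a fixed module constant, so its inverse is precomputed once:
-- # '|<' is the only multi-character code, and the single-character codes (with '1'
-- # decoding to 'L', the last letter mapped to '1') form a translation table.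
-- _LEET_INVERSE_TABLE = str.maketrans('4836107r5', 'ABEGLOTRS')
--
-- def leet_speak_decoder(text):
--     # One global replacement of the multi-character code, then one C-level
--     # character-translation pass; identity codes need no entry.
--     return text.replace('|<', 'K').translate(_LEET_INVERSE_TABLE)
-- ===== Notes on version B (the rewrite author's own statement) =====
-- stated objective: faster
-- what changed: Replaces A's per-position while-loop that tries slice lengths 4..1 against a runtime-built inverse dict and grows the output with += by a precomputed inverse translation table: one global str.replace of the single multi-character code '|<' followed by one str.translate pass.
import Mathlib
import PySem

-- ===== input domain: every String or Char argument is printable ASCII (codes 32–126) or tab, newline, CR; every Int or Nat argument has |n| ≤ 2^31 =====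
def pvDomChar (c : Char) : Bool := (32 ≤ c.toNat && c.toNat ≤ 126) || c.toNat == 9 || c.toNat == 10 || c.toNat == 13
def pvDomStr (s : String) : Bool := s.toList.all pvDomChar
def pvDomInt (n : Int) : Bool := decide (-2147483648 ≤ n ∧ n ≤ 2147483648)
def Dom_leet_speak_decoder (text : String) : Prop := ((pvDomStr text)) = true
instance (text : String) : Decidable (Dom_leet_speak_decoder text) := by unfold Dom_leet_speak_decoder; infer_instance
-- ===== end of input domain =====

-- B replaces A's positional longest-match-first while-loop over a runtime-built inverse dict by one
-- global replacement of the only multi-character code and one precomputed character-translation pass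
-- (objective: faster, a constant-factor mechanism measured).

-- ===== PORT A =====
-- leet_dict.items(); strings are handled on the List Char side (PySem.Chars style).
def leetItems : List (List Char × List Char) :=
  [(['A'], ['4']), (['B'], ['8']), (['C'], ['C']), (['D'], ['D']), (['E'], ['3']),
   (['F'], ['F']), (['G'], ['6']), (['H'], ['H']), (['I'], ['1']), (['J'], ['J']),
   (['K'], ['|', '<']), (['L'], ['1']), (['M'], ['M']), (['N'], ['N']), (['O'], ['0']),
   (['P'], ['P']), (['Q'], ['Q']), (['R'], ['r']), (['S'], ['5']), (['T'], ['7']),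
   (['U'], ['U']), (['V'], ['V']), (['W'], ['W']), (['X'], ['X']), (['Y'], ['Y']),
   (['Z'], ['Z'])]

-- inverse_leet_dict = {v: k for k, v in leet_dict.items()}
def invLeet : PySem.Dict (List Char) (List Char) :=
  leetItems.foldl (fun d kv => d.insert kv.2 kv.1) PySem.Dict.empty

-- A's while-loop over the remaining suffix text[i:]; text[i:i+n] is rest.take n, i += n is rest.drop n;
-- the 'length in range(4, 0, -1)' loop with break is the if-chain, 'in' then '[...]' is contains then getD.
def leetDecodeLoop : List Char → List Char
  | [] => []
  | c :: t =>
    if 4 ≤ (c :: t).length ∧ invLeet.contains ((c :: t).take 4) then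
      invLeet.getD ((c :: t).take 4) [] ++ leetDecodeLoop ((c :: t).drop 4)
    else if 3 ≤ (c :: t).length ∧ invLeet.contains ((c :: t).take 3) then
      invLeet.getD ((c :: t).take 3) [] ++ leetDecodeLoop ((c :: t).drop 3)
    else if 2 ≤ (c :: t).length ∧ invLeet.contains ((c :: t).take 2) then
      invLeet.getD ((c :: t).take 2) [] ++ leetDecodeLoop ((c :: t).drop 2)
    else if 1 ≤ (c :: t).length ∧ invLeet.contains ((c :: t).take 1) then
      invLeet.getD ((c :: t).take 1) [] ++ leetDecodeLoop ((c :: t).drop 1)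
    else c :: leetDecodeLoop t
  termination_by rest => rest.length
  decreasing_by all_goals (simp only [List.length_drop, List.length_cons]; omega)

def leet_speak_decoder (text : String) : String :=
  String.mk (leetDecodeLoop text.toList)

-- ===== PORT B =====
-- _LEET_INVERSE_TABLE = str.maketrans('4836107r5', 'ABEGLOTRS'); str.translate applies it per character.
def leetTrans (c : Char) : Char :=
  if c = '4' then 'A' else if c = '8' then 'B' else if c = '3' then 'E'
  else if c = '6' then 'G' else if c = '1' then 'L' else if c = '0' then 'O'
  else if c = '7' then 'T' else if c = 'r' then 'R' else if c = '5' then 'S' else c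

-- text.replace('|<', 'K').translate(_LEET_INVERSE_TABLE)
def leet_speak_decoder_alt (text : String) : String :=
  String.mk ((PySem.Chars.replace text.toList ['|', '<'] ['K']).map leetTrans)

-- ===== PRECONDITION & SPEC =====
def Spec_leet_speak_decoder (text : String) (out : String) : Prop := out = leet_speak_decoder_alt text
instance (text : String) (out : String) : Decidable (Spec_leet_speak_decoder text out) := by unfold Spec_leet_speak_decoder; infer_instance

-- ===== CLAIM (what is proved, stated in full; the proofs are below) =====
def Claim_equal_leet_speak_decoder : Prop := ∀ (text : String), Dom_leet_speak_decoder text → Spec_leet_speak_decoder text (leet_speak_decoder text)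

-- ===== LEMMAS AND PROOFS =====

lemma invLeet_keys_lit : invLeet.items.map (·.1) =
    [['4'], ['8'], ['C'], ['D'], ['3'], ['F'], ['6'], ['H'], ['1'], ['J'],
     ['|', '<'], ['M'], ['N'], ['0'], ['P'], ['Q'], ['r'], ['5'], ['7'],
     ['U'], ['V'], ['W'], ['X'], ['Y'], ['Z']] := by decide

lemma mem_keys_of_contains {l : List Char} (h : invLeet.contains l = true) :
    l ∈ invLeet.items.map (·.1) := by
  unfold PySem.Dict.contains at h
  simp only [List.any_eq_true, beq_iff_eq] at h
  obtain ⟨p, hp, he⟩ := h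
  exact List.mem_map.mpr ⟨p, hp, he⟩

-- every key of the inverse dict has length ≤ 2
lemma invLeet_key_len {l : List Char} (h : invLeet.contains l = true) : l.length ≤ 2 := by
  have hk := mem_keys_of_contains h
  rw [invLeet_keys_lit] at hk
  fin_cases hk <;> decide

-- the only two-character key is "|<"
lemma invLeet_key2 {c₁ c₂ : Char} (h : invLeet.contains [c₁, c₂] = true) :
    c₁ = '|' ∧ c₂ = '<' := by
  have hk := mem_keys_of_contains h
  rw [invLeet_keys_lit] at hk
  simp only [List.mem_cons, List.not_mem_nil, or_false, List.cons.injEq, and_true] at hk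
  rcases hk with h|h|h|h|h|h|h|h|h|h|h|h|h|h|h|h|h|h|h|h|h|h|h|h|h <;> simp_all

-- a contained single-character key decodes to exactly its translation-table image
lemma invLeet_getD_single {c : Char} (h : invLeet.contains [c] = true) :
    invLeet.getD [c] [] = [leetTrans c] := by
  have hk := mem_keys_of_contains h
  rw [invLeet_keys_lit] at hk
  simp only [List.mem_cons, List.not_mem_nil, or_false, List.cons.injEq, and_true] at hk
  rcases hk with h|h|h|h|h|h|h|h|h|h|h|h|h|h|h|h|h|h|h|h|h|h|h|h|h <;> first
    | (subst h; decide)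
    | (exact absurd h.2 (by decide))

-- an uncontained single character is fixed by the translation table
lemma leetTrans_id {c : Char} (h : invLeet.contains [c] = false) : leetTrans c = c := by
  unfold leetTrans
  split_ifs with h1 h2 h3 h4 h5 h6 h7 h8 h9 <;> first | rfl | (subst_vars; revert h; decide)

-- simple characterisation of text.replace("|<", "K")
def repK : List Char → List Char
  | [] => []
  | c :: t =>
    match t with
    | [] => [c]
    | d :: u => if c = '|' ∧ d = '<' then 'K' :: repK u else c :: repK (d :: u)

lemma repK_cons_not (c : Char) (t : List Char)
    (h : ¬ (['|', '<'] : List Char) <+: c :: t) : repK (c :: t) = c :: repK t := by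
  match t with
  | [] => rfl
  | d :: u =>
    rw [repK]
    rw [if_neg]
    rintro ⟨rfl, rfl⟩
    exact h ⟨u, rfl⟩

lemma replace_go_eq (fuel : Nat) (l acc : List Char) (h : l.length ≤ fuel) :
    PySem.Chars.replace.go ['|', '<'] ['K'] fuel l acc = acc.reverse ++ repK l := by
  induction fuel generalizing l acc with
  | zero =>
    have : l = [] := List.eq_nil_of_length_eq_zero (Nat.le_zero.mp h)
    subst this
    simp [PySem.Chars.replace.go, repK]
  | succ n ih =>
    match l with
    | [] => simp [PySem.Chars.replace.go, repK]
    | c :: t =>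
      by_cases hp : (['|', '<'] : List Char).isPrefixOf (c :: t) = true
      · obtain ⟨u, hu⟩ := List.isPrefixOf_iff_prefix.mp hp
        have hcu : c :: t = '|' :: '<' :: u := by simpa using hu.symm
        cases hcu
        rw [PySem.Chars.replace.go]
        simp only [hp, if_true]
        have hdrop : List.drop (['|', '<'] : List Char).length ('|' :: '<' :: u) = u := rfl
        rw [hdrop]
        have hlen : u.length ≤ n := by simp at h; omega
        rw [ih _ _ hlen]
        simp [repK]
      · rw [PySem.Chars.replace.go]
        simp only [if_neg hp]
        have hlen : t.length ≤ n := by simp at h; omega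
        rw [ih _ _ hlen]
        rw [repK_cons_not c t (fun hpre => hp (List.isPrefixOf_iff_prefix.mpr hpre))]
        simp

lemma replace_eq_repK (cs : List Char) :
    PySem.Chars.replace cs ['|', '<'] ['K'] = repK cs := by
  rw [PySem.Chars.replace]
  rw [if_neg (by decide)]
  simpa using replace_go_eq cs.length cs [] le_rfl

-- a non-"|<" head passes through repK and is handled by the single-char branch on both sides
lemma not_prefix_of_not_take2 (c : Char) (t : List Char)
    (h2 : ¬ (2 ≤ (c :: t).length ∧ invLeet.contains ((c :: t).take 2) = true)) :
    ¬ (['|', '<'] : List Char) <+: c :: t := by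
  rintro ⟨u, hu⟩
  have hct : c :: t = '|' :: '<' :: u := by simpa using hu.symm
  apply h2
  rw [hct]
  exact ⟨by simp, show invLeet.contains ['|', '<'] = true from by decide⟩

-- main loop equivalence: A's scan equals repK followed by the per-character translation
lemma loop_eq (cs : List Char) : leetDecodeLoop cs = (repK cs).map leetTrans := by
  induction cs using leetDecodeLoop.induct with
  | case1 => simp [leetDecodeLoop, repK]
  | case2 c t h4 ih =>
    exfalso
    obtain ⟨hl, hc⟩ := h4
    have hk := invLeet_key_len hc
    simp only [List.length_take, List.length_cons] at hk hl
    omega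
  | case3 c t h4 h3 ih =>
    exfalso
    obtain ⟨hl, hc⟩ := h3
    have hk := invLeet_key_len hc
    simp only [List.length_take, List.length_cons] at hk hl
    omega
  | case4 c t h4 h3 h2 ih =>
    -- the two-character key "|<" matched
    obtain ⟨hl, hc⟩ := h2
    cases t with
    | nil => simp at hl
    | cons d u =>
      have hc' : invLeet.contains [c, d] = true := hc
      obtain ⟨rfl, rfl⟩ := invLeet_key2 hc'
      rw [leetDecodeLoop]
      rw [if_neg h4, if_neg h3, if_pos ⟨hl, hc⟩]
      have hrep : repK ('|' :: '<' :: u) = 'K' :: repK u := by rw [repK]; simp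
      rw [hrep, List.map_cons]
      have hdrop : List.drop 2 ('|' :: '<' :: u) = u := rfl
      rw [hdrop] at ih ⊢
      rw [ih]
      have ht2 : List.take 2 ('|' :: '<' :: u) = ['|', '<'] := rfl
      rw [ht2]
      rw [show invLeet.getD ['|', '<'] ([] : List Char) = ['K'] from by decide,
          show leetTrans 'K' = 'K' from by decide]
      rfl
  | case5 c t h4 h3 h2 h1 ih =>
    -- a single-character key matched
    obtain ⟨hl, hc⟩ := h1
    have hc' : invLeet.contains [c] = true := hc
    rw [leetDecodeLoop]
    rw [if_neg h4, if_neg h3, if_neg h2, if_pos ⟨hl, hc⟩]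
    rw [repK_cons_not c t (not_prefix_of_not_take2 c t h2)]
    rw [List.map_cons]
    have hdrop : List.drop 1 (c :: t) = t := rfl
    rw [hdrop] at ih ⊢
    rw [ih]
    have ht1 : List.take 1 (c :: t) = [c] := rfl
    rw [ht1, invLeet_getD_single hc']
    rfl
  | case6 c t h4 h3 h2 h1 ih =>
    -- no key matched: the character is copied, and the table fixes it
    have hc : invLeet.contains [c] = false := by
      cases hb : invLeet.contains [c] with
      | false => rfl
      | true => exact absurd ⟨by simp, hb⟩ h1
    rw [leetDecodeLoop]
    rw [if_neg h4, if_neg h3, if_neg h2, if_neg h1]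
    rw [repK_cons_not c t (not_prefix_of_not_take2 c t h2)]
    rw [List.map_cons, leetTrans_id hc, ih]

-- ===== VERDICT (by name: the statement is the Claim_ definition above) =====
theorem leet_speak_decoder_spec : Claim_equal_leet_speak_decoder := by
  intro text _
  unfold Spec_leet_speak_decoder leet_speak_decoder leet_speak_decoder_alt
  rw [replace_eq_repK, loop_eq]
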